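-- pv_equiv track=rewrite | github.com/mnsavage/pdf_parser | src/page_parser.py | is_bold
-- ===== SOURCE A (Python) =====
-- def is_bold(font_name):
--     bold_indicators = [
--         "Bold",
--         "Bd",
--         "Demi",
--         "Black",
--         "Heavy",
--         "Fat",
--         "ExtraBold",
--         "ExBold",
--         "UltraBold",
--         "Super",
--         "Strong",
--         "Solid",
--         "Thick",
--         "Fett",
--         "Grassetto",
--         "Negrita",
--         "Medium",
--     ]
--
--     # Convert the font name to lower case to ensure case-insensitive comparison
--     font_name_lower = font_name.lower()
--
--     # Check if any of the bold indicators are in the font name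
--     return any(
--         bold_indicator.lower() in font_name_lower
--         for bold_indicator in bold_indicators
--     )
-- ===== SOURCE B (Python) =====
-- _BOLD_INDICATORS = (
--     "bold", "bd", "demi", "black", "heavy", "fat", "extrabold", "exbold",
--     "ultrabold", "super", "strong", "solid", "thick", "fett", "grassetto",
--     "negrita", "medium",
-- )
--
--
-- def is_bold(font_name):
--     # Single left-to-right scan: at each position test whether any
--     # (pre-lowercased) indicator begins there.
--     lowered = font_name.lower()
--     for i in range(len(lowered) + 1):
--         for ind in _BOLD_INDICATORS:
--             if lowered.startswith(ind, i):
--                 return True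
--     return False
-- ===== Notes on version B (the rewrite author's own statement) =====
-- stated objective: alternative
-- what changed: Replaces 17 separate whole-string substring scans of the lowered font name by a single left-to-right scan over its positions, testing at each position whether any pre-lowercased indicator is a prefix of the remaining suffix.
import Mathlib
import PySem

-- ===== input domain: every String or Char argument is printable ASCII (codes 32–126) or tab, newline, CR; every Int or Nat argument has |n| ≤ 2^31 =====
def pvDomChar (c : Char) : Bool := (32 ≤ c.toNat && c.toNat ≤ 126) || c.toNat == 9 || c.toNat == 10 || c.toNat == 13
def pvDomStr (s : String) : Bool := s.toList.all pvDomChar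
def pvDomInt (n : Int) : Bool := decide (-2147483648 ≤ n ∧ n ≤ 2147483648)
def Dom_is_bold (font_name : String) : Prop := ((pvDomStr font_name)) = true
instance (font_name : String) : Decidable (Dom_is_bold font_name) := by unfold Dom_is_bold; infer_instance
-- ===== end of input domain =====

-- B replaces A's 17 independent substring scans by one left-to-right scan with per-position prefix tests (alternative decomposition, same result).

-- ===== PORT A =====
def boldIndicators : List String :=
  ["Bold", "Bd", "Demi", "Black", "Heavy", "Fat", "ExtraBold", "ExBold",
   "UltraBold", "Super", "Strong", "Solid", "Thick", "Fett", "Grassetto",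
   "Negrita", "Medium"]

def is_bold (font_name : String) : Bool :=
  let font_name_lower := PySem.Str.lower font_name
  boldIndicators.any (fun b => PySem.Str.isIn (PySem.Str.lower b) font_name_lower)

-- ===== PORT B =====
def boldIndicatorsAlt : List (List Char) :=
  ["bold".toList, "bd".toList, "demi".toList, "black".toList, "heavy".toList,
   "fat".toList, "extrabold".toList, "exbold".toList, "ultrabold".toList,
   "super".toList, "strong".toList, "solid".toList, "thick".toList,
   "fett".toList, "grassetto".toList, "negrita".toList, "medium".toList]

-- the position loop of Source B: test every suffix for an indicator prefix
def isBoldScan : List Char → Bool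
  | [] => boldIndicatorsAlt.any (fun ind => PySem.Chars.startswith [] ind)
  | c :: rest =>
      boldIndicatorsAlt.any (fun ind => PySem.Chars.startswith (c :: rest) ind)
        || isBoldScan rest

def is_bold_alt (font_name : String) : Bool :=
  isBoldScan (PySem.Str.lower font_name).toList

-- ===== PRECONDITION & SPEC =====
def Spec_is_bold (font_name : String) (out : Bool) : Prop := out = is_bold_alt font_name
instance (font_name : String) (out : Bool) : Decidable (Spec_is_bold font_name out) := by unfold Spec_is_bold; infer_instance

-- ===== CLAIM (what is proved, stated in full; the proofs are below) =====
def Claim_equal_is_bold : Prop := ∀ (font_name : String), Dom_is_bold font_name → Spec_is_bold font_name (is_bold font_name)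

-- ===== LEMMAS AND PROOFS =====

-- the position scan decides "some indicator is a substring"
theorem isBoldScan_eq (cs : List Char) :
    isBoldScan cs = boldIndicatorsAlt.any (fun ind => PySem.Chars.isIn ind cs) := by
  induction cs with
  | nil => decide
  | cons c rest ih =>
      rw [isBoldScan, ih, Bool.eq_iff_iff]
      simp only [Bool.or_eq_true, List.any_eq_true, PySem.Chars.isIn_iff_infix,
        PySem.Chars.startswith_iff, List.infix_cons_iff]
      constructor
      · rintro (⟨x, hx, h⟩ | ⟨x, hx, h⟩)
        · exact ⟨x, hx, Or.inl h⟩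
        · exact ⟨x, hx, Or.inr h⟩
      · rintro ⟨x, hx, h | h⟩
        · exact Or.inl ⟨x, hx, h⟩
        · exact Or.inr ⟨x, hx, h⟩

theorem map_lower_indicators :
    boldIndicators.map PySem.Str.lower =
      ["bold", "bd", "demi", "black", "heavy", "fat", "extrabold", "exbold",
       "ultrabold", "super", "strong", "solid", "thick", "fett", "grassetto",
       "negrita", "medium"] := by decide

-- ===== VERDICT (by name: the statement is the Claim_ definition above) =====
theorem is_bold_spec : Claim_equal_is_bold := by
  intro font_name _
  unfold Spec_is_bold is_bold is_bold_alt
  rw [isBoldScan_eq]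
  have h : boldIndicators.any
      (fun b => PySem.Str.isIn (PySem.Str.lower b) (PySem.Str.lower font_name)) =
      (boldIndicators.map PySem.Str.lower).any
      (fun b => PySem.Str.isIn b (PySem.Str.lower font_name)) := by
    rw [List.any_map]; rfl
  rw [h, map_lower_indicators]
  simp [boldIndicatorsAlt, List.any]
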